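-- pv_equiv track=rewrite | github.com/monika-chauhan/DSA-With-Python | Bitwise Operator Problems/GFG Bit Manipulation Questions/two_numbers_with_odd_occurrences_in_an_unsorted_array.py | TwoOddNumber
-- ===== SOURCE A (Python) =====
-- def TwoOddNumber(Arr):
--     xor = 0
--     for num in Arr:
--         xor = xor ^ num
--
--     #finding the rightmost set bit in xor2
--     set_bit_no = xor & ~(xor-1)
--
--     x,y = 0, 0
--     #finding the first odd occurring number (x) and the second odd occurring number (y)
--     for i in range(len(Arr)):
--         if Arr[i] & set_bit_no:
--             x = x ^ Arr[i]
--         else: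
--             y = y ^ Arr[i]
--
--     #returning the max and min values of x and y as a list
--     v = [max(x, y), min(x, y)]
--     return v
-- ===== SOURCE B (Python) =====
-- from collections import Counter
--
-- def TwoOddNumber(Arr):
--     odds = [v for v, c in Counter(Arr).items() if c % 2 == 1]
--     xor = 0
--     for v in odds:
--         xor ^= v
--     set_bit = xor & -xor
--     x, y = 0, 0
--     for v in odds:
--         if v & set_bit:
--             x ^= v
--         else:
--             y ^= v
--     return [max(x, y), min(x, y)]
-- ===== Notes on version B (the rewrite author's own statement) =====
-- stated objective: alternative
-- what changed: B first builds a Counter and keeps only the distinct elements with odd multiplicity, then runs the XOR/set-bit partition over that (usually tiny) deduplicated list instead of A's two full passes over the array; even-count elements cancel in every XOR, so the result is identical.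
import Mathlib
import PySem

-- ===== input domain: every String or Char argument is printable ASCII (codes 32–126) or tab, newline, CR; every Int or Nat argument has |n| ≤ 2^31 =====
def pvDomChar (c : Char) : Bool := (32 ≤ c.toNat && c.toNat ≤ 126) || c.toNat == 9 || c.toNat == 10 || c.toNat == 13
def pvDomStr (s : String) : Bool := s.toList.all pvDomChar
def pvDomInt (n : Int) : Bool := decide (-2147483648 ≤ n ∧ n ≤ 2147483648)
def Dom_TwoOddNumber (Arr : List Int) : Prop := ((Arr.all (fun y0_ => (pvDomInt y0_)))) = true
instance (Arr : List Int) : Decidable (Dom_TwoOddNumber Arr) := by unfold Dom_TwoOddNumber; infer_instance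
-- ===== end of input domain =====

-- B re-derives the answer from a Counter: only the distinct odd-count elements feed the XOR
-- partition (even-count elements cancel); same return value, a different decomposition.

-- ===== PORT A =====
def TwoOddNumber (Arr : List Int) : List Int :=
  let xor := Arr.foldl (fun a num => PySem.Int.bxor a num) 0
  let set_bit_no := PySem.Int.band xor (Int.not (xor - 1))
  let xy := (PySem.List.pyRange 0 (PySem.List.len Arr) 1).foldl
      (fun (xy : Int × Int) i =>
        if PySem.Int.band (PySem.List.pyGetD Arr i 0) set_bit_no ≠ 0 then
          (PySem.Int.bxor xy.1 (PySem.List.pyGetD Arr i 0), xy.2)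
        else
          (xy.1, PySem.Int.bxor xy.2 (PySem.List.pyGetD Arr i 0)))
      (0, 0)
  [max xy.1 xy.2, min xy.1 xy.2]

-- ===== PORT B =====
def TwoOddNumber_alt (Arr : List Int) : List Int :=
  let odds := ((PySem.Dict.counter Arr).items.filter
      (fun kv => PySem.Int.mod kv.2 2 == 1)).map (fun kv => kv.1)
  let xor := odds.foldl (fun a v => PySem.Int.bxor a v) 0
  let set_bit := PySem.Int.band xor (-xor)
  let xy := odds.foldl
      (fun (xy : Int × Int) v =>
        if PySem.Int.band v set_bit ≠ 0 then (PySem.Int.bxor xy.1 v, xy.2)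
        else (xy.1, PySem.Int.bxor xy.2 v))
      (0, 0)
  [max xy.1 xy.2, min xy.1 xy.2]

-- ===== PRECONDITION & SPEC =====
def Spec_TwoOddNumber (Arr : List Int) (out : List Int) : Prop := out = TwoOddNumber_alt Arr
instance (Arr : List Int) (out : List Int) : Decidable (Spec_TwoOddNumber Arr out) := by unfold Spec_TwoOddNumber; infer_instance

-- ===== CLAIM (what is proved, stated in full; the proofs are below) =====
def Claim_equal_TwoOddNumber : Prop := ∀ (Arr : List Int), Dom_TwoOddNumber Arr → Spec_TwoOddNumber Arr (TwoOddNumber Arr)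

-- ===== LEMMAS AND PROOFS =====

-- XOR is associative (via the Int.negSucc case analysis; PySem only ships comm/self/zero).
theorem pv_bxor_eq_intxor (a b : Int) : PySem.Int.bxor a b = Int.xor a b := by
  unfold PySem.Int.bxor
  rcases a with m | m <;> rcases b with n | n <;>
    simp [Int.xor, Int.negSucc_eq] <;> omega

theorem pv_bxor_assoc (a b c : Int) :
    PySem.Int.bxor (PySem.Int.bxor a b) c = PySem.Int.bxor a (PySem.Int.bxor b c) := by
  simp only [pv_bxor_eq_intxor]
  rcases a with m | m <;> rcases b with n | n <;> rcases c with p | p <;>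
    simp [Int.xor, Nat.xor_assoc]

theorem pv_bxor_rcomm (a b c : Int) :
    PySem.Int.bxor (PySem.Int.bxor a b) c = PySem.Int.bxor (PySem.Int.bxor a c) b := by
  rw [pv_bxor_assoc, PySem.Int.bxor_comm b c, ← pv_bxor_assoc]

theorem pv_zero_bxor (a : Int) : PySem.Int.bxor 0 a = a := by
  rw [PySem.Int.bxor_comm, PySem.Int.bxor_zero]

theorem pv_bxor_cancel (a z : Int) : PySem.Int.bxor a (PySem.Int.bxor a z) = z := by
  rw [← pv_bxor_assoc, PySem.Int.bxor_self, pv_zero_bxor]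

-- hoisting an element out of a left fold of XOR
theorem pv_foldl_bxor_hoist (l : List Int) : ∀ a b : Int,
    l.foldl PySem.Int.bxor (PySem.Int.bxor a b) = PySem.Int.bxor b (l.foldl PySem.Int.bxor a) := by
  induction l with
  | nil => intro a b; simp [List.foldl, PySem.Int.bxor_comm]
  | cons c t ih =>
      intro a b
      simp only [List.foldl]
      rw [pv_bxor_rcomm a b c, ih]

theorem pv_foldl_bxor_cons (a : Int) (l : List Int) :
    (a :: l).foldl PySem.Int.bxor 0 = PySem.Int.bxor a (l.foldl PySem.Int.bxor 0) := by
  show l.foldl PySem.Int.bxor (PySem.Int.bxor 0 a) = _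
  rw [pv_foldl_bxor_hoist]

theorem pv_foldl_bxor_perm {l₁ l₂ : List Int} (h : l₁.Perm l₂) :
    ∀ a : Int, l₁.foldl PySem.Int.bxor a = l₂.foldl PySem.Int.bxor a := by
  induction h with
  | nil => intro a; rfl
  | cons x _ ih => intro a; simp only [List.foldl]; exact ih _
  | swap x y l => intro a; simp only [List.foldl]; rw [pv_bxor_rcomm]
  | trans _ _ ih1 ih2 => intro a; rw [ih1, ih2]

-- the distinct elements of l with odd multiplicity, in first-occurrence order
def pvOdds (l : List Int) : List Int :=
  (PySem.Set.ofList l).filter (fun v => l.count v % 2 == 1)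

theorem pv_mem_pvOdds (l : List Int) (v : Int) :
    v ∈ pvOdds l ↔ v ∈ l ∧ l.count v % 2 = 1 := by
  simp [pvOdds, List.mem_filter, PySem.Set.mem_ofList]

theorem pv_nodup_pvOdds (l : List Int) : (pvOdds l).Nodup :=
  (PySem.Set.nodup_ofList l).filter _

theorem pv_pvOdds_cons_even {a : Int} {t : List Int} (h : t.count a % 2 = 0) :
    (pvOdds (a :: t)).Perm (a :: pvOdds t) := by
  rw [List.perm_ext_iff_of_nodup (pv_nodup_pvOdds _)
      (List.nodup_cons.mpr ⟨fun hmem => by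
        rcases (pv_mem_pvOdds t a).mp hmem with ⟨_, hodd⟩; omega, pv_nodup_pvOdds t⟩)]
  intro v
  by_cases hv : v = a
  · subst hv
    simp [pv_mem_pvOdds, List.count_cons, h]
    omega
  · have hav : a ≠ v := fun h' => hv h'.symm
    simp [pv_mem_pvOdds, List.count_cons, hv, hav, List.mem_cons]

theorem pv_pvOdds_cons_odd {a : Int} {t : List Int} (h : t.count a % 2 = 1) :
    (pvOdds t).Perm (a :: pvOdds (a :: t)) := by
  rw [List.perm_ext_iff_of_nodup (pv_nodup_pvOdds _)
      (List.nodup_cons.mpr ⟨fun hmem => by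
        rcases (pv_mem_pvOdds (a :: t) a).mp hmem with ⟨_, hodd⟩
        simp [List.count_cons] at hodd; omega, pv_nodup_pvOdds _⟩)]
  intro v
  by_cases hv : v = a
  · subst hv
    constructor
    · intro _; exact List.mem_cons_self
    · intro _
      exact (pv_mem_pvOdds t _).mpr ⟨List.count_pos_iff.mp (by omega), h⟩
  · have hav : a ≠ v := fun h' => hv h'.symm
    simp [pv_mem_pvOdds, List.count_cons, hv, hav, List.mem_cons]

-- key parity lemma: a filtered XOR fold over l only depends on the odd-count elements
theorem pv_G_filter_odds (p : Int → Bool) : ∀ l : List Int,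
    (l.filter p).foldl PySem.Int.bxor 0 = ((pvOdds l).filter p).foldl PySem.Int.bxor 0 := by
  intro l
  induction l with
  | nil => rfl
  | cons a t ih =>
      rcases Nat.even_or_odd (t.count a) with he | ho
      · have h0 : t.count a % 2 = 0 := Nat.even_iff.mp he
        have hperm := (pv_pvOdds_cons_even h0).filter p
        rw [List.filter_cons]
        rw [pv_foldl_bxor_perm hperm, List.filter_cons]
        by_cases hp : p a
        · simp only [hp, if_pos]
          rw [pv_foldl_bxor_cons, pv_foldl_bxor_cons, ih]
        · simp only [hp]
          simpa using ih
      · have h1 : t.count a % 2 = 1 := Nat.odd_iff.mp ho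
        have hperm := (pv_pvOdds_cons_odd h1).filter p
        have hGt : (t.filter p).foldl PySem.Int.bxor 0
            = ((a :: pvOdds (a :: t)).filter p).foldl PySem.Int.bxor 0 := by
          rw [ih, pv_foldl_bxor_perm hperm]
        rw [List.filter_cons] at *
        by_cases hp : p a
        · simp only [hp, if_pos] at *
          rw [pv_foldl_bxor_cons, hGt, pv_foldl_bxor_cons, pv_bxor_cancel]
        · simp only [hp] at *
          simpa using hGt

theorem pv_xor_total (l : List Int) :
    l.foldl PySem.Int.bxor 0 = (pvOdds l).foldl PySem.Int.bxor 0 := by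
  have h := pv_G_filter_odds (fun _ => true) l
  simpa using h

-- the partition loop, characterised as two filtered XOR folds
theorem pv_pairfold (sb : Int) : ∀ (l : List Int) (x y : Int),
    l.foldl (fun (xy : Int × Int) v =>
        if PySem.Int.band v sb ≠ 0 then (PySem.Int.bxor xy.1 v, xy.2)
        else (xy.1, PySem.Int.bxor xy.2 v)) (x, y)
    = ((l.filter (fun v => decide (PySem.Int.band v sb ≠ 0))).foldl PySem.Int.bxor x,
       (l.filter (fun v => !decide (PySem.Int.band v sb ≠ 0))).foldl PySem.Int.bxor y) := by
  intro l
  induction l with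
  | nil => intro x y; rfl
  | cons v t ih =>
      intro x y
      by_cases h : PySem.Int.band v sb ≠ 0
      · rw [List.foldl_cons, if_pos h, List.filter_cons, List.filter_cons,
          if_pos (by simpa using h), if_neg (by simpa using h)]
        exact ih _ _
      · rw [List.foldl_cons, if_neg h, List.filter_cons, List.filter_cons,
          if_neg (by simpa using h), if_pos (by simpa using h)]
        exact ih _ _

theorem pv_not_eq (x : Int) : Int.not x = -x - 1 := by
  rcases x with m | m <;> simp [Int.not, Int.negSucc_eq] <;> omega

theorem pv_not_sub_one (x : Int) : Int.not (x - 1) = -x := by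
  rw [pv_not_eq]; ring

theorem pv_mod_two (n : Nat) : (PySem.Int.mod (n : Int) 2 == 1) = (n % 2 == 1) := by
  have h2 : ((2:Int)) = ((2:Nat):Int) := by norm_num
  rw [h2, PySem.Int.mod_natCast]
  simp
  omega

-- B's odds list is pvOdds
theorem pv_alt_odds_eq (Arr : List Int) :
    ((PySem.Dict.counter Arr).items.filter
        (fun kv => PySem.Int.mod kv.2 2 == 1)).map (fun kv => kv.1) = pvOdds Arr := by
  rw [PySem.Dict.items_counter, List.filter_map, List.map_map]
  have hmap : ((fun kv : Int × Int => kv.1) ∘ fun k : Int => (k, (List.count k Arr : Int))) = id := rfl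
  rw [hmap, List.map_id]
  unfold pvOdds
  apply List.filter_congr
  intro k _
  simp only [Function.comp_apply]
  exact pv_mod_two (List.count k Arr)

-- ===== VERDICT (by name: the statement is the Claim_ definition above) =====
theorem TwoOddNumber_spec : Claim_equal_TwoOddNumber := by
  intro Arr _
  unfold Spec_TwoOddNumber TwoOddNumber TwoOddNumber_alt
  simp only [pv_alt_odds_eq]
  rw [PySem.List.foldl_pyRange_zero_pyGetD Arr 0
    (fun (xy : Int × Int) v =>
        if PySem.Int.band v (PySem.Int.band (Arr.foldl (fun a num => PySem.Int.bxor a num) 0)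
            (Int.not (Arr.foldl (fun a num => PySem.Int.bxor a num) 0 - 1))) ≠ 0 then
          (PySem.Int.bxor xy.1 v, xy.2)
        else (xy.1, PySem.Int.bxor xy.2 v)) (0, 0)]
  have hx : Arr.foldl (fun a num => PySem.Int.bxor a num) 0
      = (pvOdds Arr).foldl (fun a v => PySem.Int.bxor a v) 0 := pv_xor_total Arr
  rw [hx, pv_not_sub_one]
  rw [pv_pairfold, pv_pairfold]
  rw [pv_G_filter_odds _ Arr, pv_G_filter_odds _ Arr]
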